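-- pv_equiv track=rewrite | github.com/jinnian07/frb-tsk2 | P0002/tools/p0002_parse_std.py | parse_nonneg_int_line
-- ===== SOURCE A (Python) =====
-- def _skip_ws(s: str, p: int) -> int:
--     n = len(s)
--     while p < n and s[p] in " \t\r":
--         p += 1
--     return p
--
-- def parse_nonneg_int_line(s: str) -> int | None:
--     p = _skip_ws(s, 0)
--     n = len(s)
--     v = 0
--     any_d = False
--     while p < n and "0" <= s[p] <= "9":
--         d = ord(s[p]) - 48
--         if v > (2147483647 - d) // 10:
--             return None
--         v = v * 10 + d
--         any_d = True
--         p += 1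
--     if not any_d:
--         return None
--     p = _skip_ws(s, p)
--     if p != n:
--         return None
--     return v
-- ===== SOURCE B (Python) =====
-- def parse_nonneg_int_line(s: str) -> int | None:
--     t = s.strip(" \t\r")
--     if not t or any(c < "0" or c > "9" for c in t):
--         return None
--     v = sum((ord(c) - 48) * 10 ** i for i, c in enumerate(reversed(t)))
--     return v if v <= 2147483647 else None
-- ===== Notes on version B (the rewrite author's own statement) =====
-- stated objective: simpler
-- what changed: Replaces A's two index-based whitespace-skipping loops and its fused digit loop with inline overflow-guard arithmetic by one strip call over the space/tab/CR set, a single all-digits validation pass, a positional-weight digit sum over the reversed string, and one final range check against 2147483647.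
import Mathlib
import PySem

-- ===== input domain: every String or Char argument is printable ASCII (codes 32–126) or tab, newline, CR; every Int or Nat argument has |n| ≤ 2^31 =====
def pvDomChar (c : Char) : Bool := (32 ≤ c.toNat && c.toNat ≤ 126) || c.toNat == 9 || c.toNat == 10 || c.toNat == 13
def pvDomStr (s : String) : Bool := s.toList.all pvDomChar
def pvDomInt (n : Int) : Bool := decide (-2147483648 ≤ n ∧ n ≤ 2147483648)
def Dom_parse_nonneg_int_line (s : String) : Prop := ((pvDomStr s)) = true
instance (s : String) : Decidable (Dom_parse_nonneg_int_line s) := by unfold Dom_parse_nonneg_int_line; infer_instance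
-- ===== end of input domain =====

-- B strips " \t\r" from both ends, validates all-digits in one pass, and sums positional digit
-- values instead of A's two skip-whitespace loops fused with a Horner accumulation guarded by an
-- inline overflow test (objective: simpler).

-- ===== PORT A =====
-- membership test `c in " \t\r"` as list containment
def pvSkipWs : List Char → List Char
  | [] => []
  | c :: cs => if (" \t\r".toList).contains c then pvSkipWs cs else c :: cs

-- code after A's digit loop: `if not any_d … if p != n … return v`
def pvAFinish (cs : List Char) (v : Int) (anyd : Bool) : Option Int :=
  if anyd = false then none
  else if pvSkipWs cs = [] then some v else none

-- A's digit while-loop with its early `return None` on overflow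
def pvALoop : List Char → Int → Bool → Option Int
  | [], v, anyd => pvAFinish [] v anyd
  | c :: cs, v, anyd =>
    if '0' ≤ c ∧ c ≤ '9' then
      let d : Int := (c.toNat : Int) - 48
      if v > PySem.Int.floordiv (2147483647 - d) 10 then none
      else pvALoop cs (v * 10 + d) true
    else pvAFinish (c :: cs) v anyd

def parse_nonneg_int_line (s : String) : Option Int :=
  pvALoop (pvSkipWs s.toList) 0 false

-- ===== PORT B =====
-- Source B: t = s.strip(" \t\r"); reject empty / non-digit; v = Σ (ord(c)-48)·10^i over enumerate(reversed(t)).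
-- `p.1.toNat` is exact: enumerate from 0 yields non-negative indices.
def parse_nonneg_int_line_alt (s : String) : Option Int :=
  let t := PySem.Chars.stripChars s.toList " \t\r".toList
  if t.isEmpty || t.any (fun c => decide (c < '0') || decide ('9' < c)) then none
  else
    let v : Int := ((PySem.List.enumerate t.reverse 0).map
      (fun p => ((p.2.toNat : Int) - 48) * 10 ^ p.1.toNat)).sum
    if v ≤ 2147483647 then some v else none

-- ===== PRECONDITION & SPEC =====
def Spec_parse_nonneg_int_line (s : String) (out : Option Int) : Prop := out = parse_nonneg_int_line_alt s
instance (s : String) (out : Option Int) : Decidable (Spec_parse_nonneg_int_line s out) := by unfold Spec_parse_nonneg_int_line; infer_instance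

-- ===== CLAIM (what is proved, stated in full; the proofs are below) =====
def Claim_equal_parse_nonneg_int_line : Prop := ∀ (s : String), Dom_parse_nonneg_int_line s → Spec_parse_nonneg_int_line s (parse_nonneg_int_line s)

-- ===== LEMMAS AND PROOFS =====
-- abbreviations for the proofs
def pvWsP (c : Char) : Bool := (" \t\r".toList).contains c
def pvDigP (c : Char) : Bool := decide ('0' ≤ c ∧ c ≤ '9')
-- Horner accumulator of A's loop
def pvW (v : Int) (ds : List Char) : Int := ds.foldl (fun a c => a * 10 + ((c.toNat : Int) - 48)) v
-- B's weighted digit sum (argument = reversed digit list)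
def pvS (l : List Char) : Int :=
  ((PySem.List.enumerate l 0).map (fun p => ((p.2.toNat : Int) - 48) * 10 ^ p.1.toNat)).sum

theorem pvSkipWs_eq (cs : List Char) : pvSkipWs cs = cs.dropWhile pvWsP := by
  induction cs with
  | nil => rfl
  | cons c cs ih => simp only [pvSkipWs, List.dropWhile_cons, pvWsP]; split <;> simp [ih]

theorem pvWsLit : " \t\r".toList = [' ', '\t', '\r'] := by decide

theorem pvDig_not_ws {c : Char} (h : '0' ≤ c ∧ c ≤ '9') : pvWsP c = false := by
  rw [pvWsP, pvWsLit]
  have : ¬ (c = ' ' ∨ c = '\t' ∨ c = '\r') := by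
    rintro (rfl | rfl | rfl) <;> revert h <;> decide
  simpa using this

theorem pvDig_bounds {c : Char} (h : '0' ≤ c ∧ c ≤ '9') :
    0 ≤ (c.toNat : Int) - 48 ∧ (c.toNat : Int) - 48 ≤ 9 := by
  obtain ⟨h1, h2⟩ := h
  rw [Char.le_def, UInt32.le_iff_toNat_le] at h1 h2
  change 48 ≤ c.toNat at h1
  change c.toNat ≤ 57 at h2
  omega

theorem pvW_ge (ds : List Char) : ∀ v : Int, 0 ≤ v → (∀ c ∈ ds, '0' ≤ c ∧ c ≤ '9') →
    v ≤ pvW v ds := by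
  induction ds with
  | nil => intro v _ _; simp [pvW]
  | cons c ds ih =>
    intro v hv hd
    have hb := pvDig_bounds (hd c (by simp))
    have h1 : v ≤ v * 10 + ((c.toNat : Int) - 48) := by nlinarith
    have h2 := ih (v * 10 + ((c.toNat : Int) - 48)) (by nlinarith) (fun x hx => hd x (by simp [hx]))
    simp only [pvW, List.foldl_cons] at h2 ⊢
    omega

theorem pvOvf {v d : Int} (_hv : 0 ≤ v) (_hd0 : 0 ≤ d) (_hd9 : d ≤ 9) :
    (v > PySem.Int.floordiv (2147483647 - d) 10) ↔ 2147483647 < v * 10 + d := by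
  rw [PySem.Int.floordiv_eq_ediv_of_pos (by norm_num)]
  omega

theorem pvALoop_eq (ds : List Char) : ∀ (rest : List Char) (v : Int) (anyd : Bool),
    (∀ c ∈ ds, '0' ≤ c ∧ c ≤ '9') →
    (∀ c, rest.head? = some c → ¬ ('0' ≤ c ∧ c ≤ '9')) →
    0 ≤ v → v ≤ 2147483647 →
    pvALoop (ds ++ rest) v anyd =
      if 2147483647 < pvW v ds then none else pvAFinish rest (pvW v ds) (anyd || !ds.isEmpty) := by
  induction ds with
  | nil =>
    intro rest v anyd _ hrest hv hvM
    have : pvALoop rest v anyd = pvAFinish rest v anyd := by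
      cases rest with
      | nil => rfl
      | cons c cs =>
        have := hrest c rfl
        simp only [pvALoop, if_neg this]
    simp [pvW, this, if_neg (by omega : ¬ 2147483647 < v)]
  | cons c ds ih =>
    intro rest v anyd hds hrest hv hvM
    have hc := hds c (by simp)
    have hb := pvDig_bounds hc
    have hW : pvW v (c :: ds) = pvW (v * 10 + ((c.toNat : Int) - 48)) ds := by
      simp [pvW]
    simp only [List.cons_append, pvALoop, if_pos hc]
    by_cases hov : v > PySem.Int.floordiv (2147483647 - ((c.toNat : Int) - 48)) 10
    · rw [if_pos hov]
      have : 2147483647 < v * 10 + ((c.toNat : Int) - 48) := (pvOvf hv hb.1 hb.2).mp hov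
      have hge := pvW_ge ds (v * 10 + ((c.toNat : Int) - 48)) (by omega)
        (fun x hx => hds x (by simp [hx]))
      rw [hW, if_pos (by omega)]
    · rw [if_neg hov]
      have hle : v * 10 + ((c.toNat : Int) - 48) ≤ 2147483647 := by
        have := (pvOvf hv hb.1 hb.2).not.mp hov; omega
      rw [ih rest _ true (fun x hx => hds x (by simp [hx])) hrest (by omega) hle, hW]
      simp

theorem pvS_append (l : List Char) (c : Char) :
    pvS (l ++ [c]) = pvS l + ((c.toNat : Int) - 48) * 10 ^ l.length := by
  simp [pvS, PySem.List.enumerate_append, PySem.List.enumerate_cons, PySem.List.enumerate_nil]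

theorem pvW_eq_pvS (ds : List Char) : ∀ v : Int, pvW v ds = v * 10 ^ ds.length + pvS ds.reverse := by
  induction ds with
  | nil => intro v; simp [pvW, pvS, PySem.List.enumerate_nil]
  | cons c ds ih =>
    intro v
    have h1 : pvW v (c :: ds) = pvW (v * 10 + ((c.toNat : Int) - 48)) ds := by simp [pvW]
    rw [h1, ih, List.reverse_cons, pvS_append]
    simp [List.length_reverse, pow_succ]
    ring

-- dropWhile keeps the last element whenever it keeps anything
theorem pvDropLast {p : Char → Bool} {w : List Char} (hne : w.dropWhile p ≠ []) :
    (w.dropWhile p).getLast? = w.getLast? := by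
  obtain ⟨pre, hpre⟩ := List.dropWhile_suffix (l := w) p
  conv_rhs => rw [← hpre]
  exact (List.getLast?_append_of_ne_nil pre hne).symm

-- the head of `l` survives stripping the right end of `l.reverse` (if anything survives)
theorem pvSurvMem {p : Char → Bool} {l : List Char} {c : Char}
    (h : l.head? = some c) (hne : l.reverse.dropWhile p ≠ []) : c ∈ l.reverse.dropWhile p :=
  List.mem_of_getLast? (by rw [pvDropLast hne, List.getLast?_reverse]; exact h)

theorem pvNonDigTest {c : Char} (h : ¬ ('0' ≤ c ∧ c ≤ '9')) :
    (decide (c < '0') || decide ('9' < c)) = true := by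
  rcases not_and_or.mp h with h' | h' <;> simp [not_le.mp h']

theorem parse_nonneg_int_line_eq (s : String) :
    parse_nonneg_int_line s = parse_nonneg_int_line_alt s := by
  have hstrip : PySem.Chars.stripChars s.toList " \t\r".toList
      = ((s.toList.dropWhile pvWsP).reverse.dropWhile pvWsP).reverse := rfl
  set l₁ : List Char := s.toList.dropWhile pvWsP with hl₁
  set ds : List Char := l₁.takeWhile pvDigP with hds
  set rest : List Char := l₁.dropWhile pvDigP with hrest
  have hsplit : ds ++ rest = l₁ := List.takeWhile_append_dropWhile
  have hdsdig : ∀ c ∈ ds, '0' ≤ c ∧ c ≤ '9' := by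
    intro c hcm
    have := List.mem_takeWhile_imp hcm
    simpa [pvDigP] using this
  have hresthd : ∀ c, rest.head? = some c → ¬ ('0' ≤ c ∧ c ≤ '9') := by
    intro c hc
    have := List.head?_dropWhile_not pvDigP l₁
    rw [← hrest, hc] at this
    simpa [pvDigP] using this
  have hA : parse_nonneg_int_line s
      = if 2147483647 < pvW 0 ds then none
        else pvAFinish rest (pvW 0 ds) (false || !ds.isEmpty) := by
    rw [parse_nonneg_int_line, pvSkipWs_eq, ← hl₁, ← hsplit]
    exact pvALoop_eq ds rest 0 false hdsdig hresthd le_rfl (by norm_num)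
  rw [hA]
  rw [parse_nonneg_int_line_alt]
  simp only [hstrip]
  rcases hds' : ds with _ | ⟨c₀, ds'⟩
  · -- no digits at the front of the stripped input: both sides return none
    rw [hds'] at hA hsplit
    simp only [List.nil_append] at hsplit
    have hAnone : (if 2147483647 < pvW 0 ([] : List Char) then none
        else pvAFinish rest (pvW 0 ([] : List Char)) (false || !List.isEmpty ([] : List Char)))
        = (none : Option Int) := by
      simp [pvW, pvAFinish]
    rw [hAnone]
    rcases hl : l₁ with _ | ⟨c, l'⟩
    · simp
    · -- head of l₁ is neither whitespace nor a digit; it survives into t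
      have hcdig : pvDigP c = false := by
        by_contra hpc
        rw [Bool.not_eq_false] at hpc
        have h0 : ds = c :: List.takeWhile pvDigP l' := by
          rw [hds, hl, List.takeWhile_cons_of_pos hpc]
        rw [hds'] at h0
        exact absurd h0.symm (by simp)
      have hcws : pvWsP c = false := by
        have := List.head?_dropWhile_not pvWsP s.toList
        rw [← hl₁, hl] at this
        simpa using this
      have hmt : c ∈ (l₁.reverse.dropWhile pvWsP).reverse := by
        rw [List.mem_reverse]
        refine pvSurvMem (by rw [hl]; rfl) ?_
        rw [Ne, List.dropWhile_eq_nil_iff]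
        push_neg
        exact ⟨c, List.mem_reverse.mpr (by rw [hl]; simp), by simp [hcws]⟩
      have hany : ((l₁.reverse.dropWhile pvWsP).reverse.any
          fun c => decide (c < '0') || decide ('9' < c)) = true :=
        List.any_eq_true.mpr ⟨c, hmt, pvNonDigTest (by simpa [pvDigP] using hcdig)⟩
      rw [← hl]
      simp [hany]
  · -- at least one digit
    rw [← hds']
    have hdsne : ds ≠ [] := by rw [hds']; simp
    by_cases hws : ∀ x ∈ rest, pvWsP x = true
    · -- everything after the digits is strippable whitespace: t = ds
      have h1 : rest.reverse.dropWhile pvWsP = [] :=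
        List.dropWhile_eq_nil_iff.mpr (fun x hx => hws x (List.mem_reverse.mp hx))
      have h2 : l₁.reverse.dropWhile pvWsP = ds.reverse := by
        rw [← hsplit, List.reverse_append, List.dropWhile_append, h1]
        simp only [List.isEmpty_nil, if_pos]
        rcases hdr : ds.reverse with _ | ⟨e, es⟩
        · exact absurd (by simpa using congrArg List.reverse hdr) hdsne
        · have he : e ∈ ds := by
            rw [← List.mem_reverse, hdr]; simp
          exact List.dropWhile_cons_of_neg (by simp [pvDig_not_ws (hdsdig e he)])
      have hany : (ds.any fun c => decide (c < '0') || decide ('9' < c)) = false := by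
        rw [List.any_eq_false]
        intro c hcm
        have := hdsdig c hcm
        simp [not_lt.mpr this.1, not_lt.mpr this.2]
      have hskip : pvSkipWs rest = [] := by
        rw [pvSkipWs_eq]
        exact List.dropWhile_eq_nil_iff.mpr hws
      have hfin : pvAFinish rest (pvW 0 ds) (false || !ds.isEmpty) = some (pvW 0 ds) := by
        rw [pvAFinish]
        simp [hskip, hdsne]
      rw [h2, List.reverse_reverse]
      have hv : pvS ds.reverse = pvW 0 ds := by
        rw [pvW_eq_pvS]; simp
      have hEmp : ds.isEmpty = false := by
        rcases hd2 : ds with _ | ⟨a, b⟩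
        · exact absurd hd2 hdsne
        · rfl
      have hcond : ¬ ((ds.isEmpty || ds.any fun c => decide (c < '0') || decide ('9' < c)) = true) := by
        simp [hEmp, hany]
      rw [if_neg hcond, hfin]
      rw [show ((PySem.List.enumerate ds.reverse 0).map
        (fun p => ((p.2.toNat : Int) - 48) * 10 ^ p.1.toNat)).sum = pvS ds.reverse from rfl, hv]
      by_cases hM : pvW 0 ds ≤ 2147483647
      · rw [if_neg (not_lt.mpr hM), if_pos hM]
      · rw [if_pos (not_le.mp hM), if_neg hM]
    · -- a non-whitespace character remains after the digits: both sides return none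
      push_neg at hws
      obtain ⟨x, hxm, hxws⟩ := hws
      have hrestne : rest ≠ [] := by intro h0; rw [h0] at hxm; simp at hxm
      obtain ⟨r₀, rest', hr⟩ := List.exists_cons_of_ne_nil hrestne
      have hr₀dig : ¬ ('0' ≤ r₀ ∧ r₀ ≤ '9') := hresthd r₀ (by rw [hr]; rfl)
      have hskip : pvSkipWs rest ≠ [] := by
        rw [pvSkipWs_eq, Ne, List.dropWhile_eq_nil_iff]
        push_neg
        exact ⟨x, hxm, by simp [Bool.not_eq_true] at hxws ⊢; exact hxws⟩
      have hAnone : (if 2147483647 < pvW 0 ds then none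
          else pvAFinish rest (pvW 0 ds) (false || !ds.isEmpty)) = (none : Option Int) := by
        rw [pvAFinish]
        split
        · rfl
        · simp [hdsne]
      rw [hAnone]
      -- r₀ survives into t and is not a digit
      have h1 : rest.reverse.dropWhile pvWsP ≠ [] := by
        rw [Ne, List.dropWhile_eq_nil_iff]
        push_neg
        exact ⟨x, List.mem_reverse.mpr hxm, by simp [Bool.not_eq_true] at hxws ⊢; exact hxws⟩
      have h2 : l₁.reverse.dropWhile pvWsP
          = rest.reverse.dropWhile pvWsP ++ ds.reverse := by
        rw [← hsplit, List.reverse_append, List.dropWhile_append]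
        have hne2 : (rest.reverse.dropWhile pvWsP).isEmpty = false := by
          rcases hu : rest.reverse.dropWhile pvWsP with _ | ⟨a, b⟩
          · exact absurd hu h1
          · rfl
        rw [hne2]
        simp
      have hr₀mem : r₀ ∈ (l₁.reverse.dropWhile pvWsP).reverse := by
        rw [List.mem_reverse, h2]
        exact List.mem_append_left _ (pvSurvMem (by rw [hr]; rfl) h1)
      have hany : ((l₁.reverse.dropWhile pvWsP).reverse.any
          fun c => decide (c < '0') || decide ('9' < c)) = true :=
        List.any_eq_true.mpr ⟨r₀, hr₀mem, pvNonDigTest hr₀dig⟩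
      simp [hany]

-- ===== VERDICT (by name: the statement is the Claim_ definition above) =====
theorem parse_nonneg_int_line_spec : Claim_equal_parse_nonneg_int_line := by
  intro s _
  exact parse_nonneg_int_line_eq s
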